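-- pv_equiv track=rewrite | github.com/casePloeg/kattis | honey.py | solution
-- ===== SOURCE A (Python) =====
-- def solution(S):
--     # write your code in Python 3.6
--     count = 0
--     cur = ''
--     correct = ''
--     for i in range(len(S)):
--         if S[i] == cur and count >= 3:
--             count += 1
--         elif S[i] == cur and count < 3:
--             count += 1
--             correct += S[i]
--         elif S[i] != cur:
--             cur = S[i]
--             correct += S[i]
--             count = 1
--     return correct
-- ===== SOURCE B (Python) =====
-- from itertools import groupby
--
-- def solution(S):
--     # write your code in Python 3.6
--     return ''.join(c * min(len(list(g)), 3) for c, g in groupby(S))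
-- ===== Notes on version B (the rewrite author's own statement) =====
-- stated objective: idiomatic
-- what changed: Replaces the char-by-char scan with mutable count/cur/correct state by grouping S into maximal runs with itertools.groupby and emitting min(len,3) copies of each run's character, joined once.
import Mathlib
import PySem

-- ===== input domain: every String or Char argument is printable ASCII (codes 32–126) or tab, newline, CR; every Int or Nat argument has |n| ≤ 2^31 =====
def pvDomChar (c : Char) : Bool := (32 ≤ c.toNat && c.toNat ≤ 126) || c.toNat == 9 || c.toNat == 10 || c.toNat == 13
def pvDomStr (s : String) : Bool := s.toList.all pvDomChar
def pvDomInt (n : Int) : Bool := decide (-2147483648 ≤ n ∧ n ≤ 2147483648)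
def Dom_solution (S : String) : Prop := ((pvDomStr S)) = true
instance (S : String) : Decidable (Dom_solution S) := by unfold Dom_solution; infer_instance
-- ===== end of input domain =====

-- B collapses S into maximal runs (groupby) and emits min(len,3) copies per run; A scans char by char with count/cur state. Idiomatic rewrite, same O(n) cost.

-- ===== PORT A =====
-- A's loop over range(len(S)), carrying count / cur / correct; cur starts as '' (no char), so cur : Option Char.
def solGo (count : Int) (cur : Option Char) (correct : List Char) : List Char → List Char
  | [] => correct
  | x :: xs =>
    if some x = cur ∧ count ≥ 3 then solGo (count + 1) cur correct xs
    else if some x = cur ∧ count < 3 then solGo (count + 1) cur (correct ++ [x]) xs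
    else solGo 1 (some x) (correct ++ [x]) xs

def solution (S : String) : String := String.ofList (solGo 0 none [] S.toList)

-- ===== PORT B =====
-- groupby: split off the maximal run of the head character, recurse on the rest.
def runsB : List Char → List (Char × Nat)
  | [] => []
  | c :: cs => (c, (cs.takeWhile (· == c)).length + 1) :: runsB (cs.dropWhile (· == c))
termination_by l => l.length
decreasing_by
  simp only [List.length_cons]
  exact Nat.lt_succ_of_le (List.length_dropWhile_le (· == c) cs)

def solution_alt (S : String) : String :=
  String.ofList ((runsB S.toList).flatMap (fun p => List.replicate (min p.2 3) p.1))

-- ===== PRECONDITION & SPEC =====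
def Spec_solution (S : String) (out : String) : Prop := out = solution_alt S
instance (S : String) (out : String) : Decidable (Spec_solution S out) := by unfold Spec_solution; infer_instance

-- ===== CLAIM (what is proved, stated in full; the proofs are below) =====
def Claim_equal_solution : Prop := ∀ (S : String), Dom_solution S → Spec_solution S (solution S)

-- ===== LEMMAS AND PROOFS =====

-- result of B on a char list
def flatRuns (xs : List Char) : List Char :=
  (runsB xs).flatMap (fun p => List.replicate (min p.2 3) p.1)

-- continuation of A's loop while inside the run of character c, having emitted k so far
def contA (c : Char) (k : Int) : List Char → List Char
  | [] => []
  | x :: xs =>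
    if x = c then (if k ≥ 3 then contA c (k + 1) xs else x :: contA c (k + 1) xs)
    else x :: contA x 1 xs

theorem solGo_some (xs : List Char) : ∀ (c : Char) (k : Int) (acc : List Char),
    solGo k (some c) acc xs = acc ++ contA c k xs := by
  induction xs with
  | nil => intro c k acc; simp [solGo, contA]
  | cons x xs ih =>
    intro c k acc
    by_cases hx : x = c
    · subst hx
      by_cases hk : k ≥ 3
      · simp [solGo, contA, hk, ih]
      · simp [solGo, contA, hk, ih, lt_of_not_ge hk]
    · simp [solGo, contA, hx, ih]

theorem takeWhile_replicate (c : Char) (l : List Char) :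
    l.takeWhile (· == c) = List.replicate (l.takeWhile (· == c)).length c := by
  induction l with
  | nil => simp
  | cons x xs ih =>
    by_cases h : x = c
    · subst h; simpa [List.replicate] using ih
    · simp [h]

theorem contA_span (xs : List Char) : ∀ (c : Char) (k : Int), 1 ≤ k →
    contA c k xs =
      (xs.takeWhile (· == c)).take (3 - k).toNat ++ flatRuns (xs.dropWhile (· == c)) := by
  induction xs with
  | nil => intro c k _; simp [contA, flatRuns, runsB]
  | cons x xs ih =>
    intro c k hk
    by_cases hx : x = c
    · subst hx
      by_cases h3 : k ≥ 3
      · have h0 : (3 - k).toNat = 0 := by omega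
        have h1 : (3 - (k + 1)).toNat = 0 := by omega
        simp [contA, h3, List.takeWhile, List.dropWhile, h0,
          ih x (k + 1) (by omega), h1]
      · have h0 : (3 - k).toNat = (3 - (k + 1)).toNat + 1 := by omega
        simp [contA, h3, List.takeWhile, List.dropWhile, h0,
          ih x (k + 1) (by omega)]
    · have h1 : (3 - (1 : Int)).toNat = 2 := by decide
      have hb : (x == c) = false := by simp [hx]
      simp only [contA, if_neg hx, ih x 1 le_rfl, h1]
      simp only [List.takeWhile_cons, List.dropWhile_cons, hb, if_false, Bool.false_eq_true,
        List.take_nil, List.nil_append]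
      simp only [flatRuns, runsB, List.flatMap_cons]
      have hL : (xs.takeWhile (· == x)).take 2 =
          List.replicate (min 2 (xs.takeWhile (· == x)).length) x := by
        conv_lhs => rw [takeWhile_replicate x xs]
        simp [List.take_replicate]
      have hmin : min ((xs.takeWhile (· == x)).length + 1) 3 =
          min 2 (xs.takeWhile (· == x)).length + 1 := by omega
      simp [hL, hmin, List.replicate_succ]
    

theorem solGo_none (xs : List Char) : solGo 0 none [] xs = flatRuns xs := by
  cases xs with
  | nil => simp [solGo, flatRuns, runsB]
  | cons x xs =>
    have : solGo 0 none [] (x :: xs) = solGo 1 (some x) [x] xs := by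
      simp [solGo]
    rw [this, solGo_some xs x 1 [x], contA_span xs x 1 le_rfl]
    simp only [flatRuns, runsB, List.flatMap_cons]
    have h1 : (3 - (1 : Int)).toNat = 2 := by decide
    have hL : (xs.takeWhile (· == x)).take 2 =
        List.replicate (min 2 (xs.takeWhile (· == x)).length) x := by
      conv_lhs => rw [takeWhile_replicate x xs]
      simp [List.take_replicate]
    have hmin : min ((xs.takeWhile (· == x)).length + 1) 3 =
        min 2 (xs.takeWhile (· == x)).length + 1 := by omega
    simp [hL, hmin, List.replicate_succ]

-- ===== VERDICT (by name: the statement is the Claim_ definition above) =====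
theorem solution_spec : Claim_equal_solution := by
  intro S _
  unfold Spec_solution solution solution_alt
  rw [solGo_none]
  rfl
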